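-- pv_equiv track=rewrite | github.com/siddheshengineer/DSA-and-leetcode | StackAndQueue/LeetCode/lexicographically-minimum-string-after-removing-stars.py | clearStars
-- ===== SOURCE A (Python) =====
-- def clearStars(s: str) -> str:
--     char = [[] for _ in range(26)] # Character stack
--     arr = list(s)
--
--     for i, c in enumerate(arr):
--         if c != '*':
--             char[ord(c) - ord('a')].append(i)
--         else:
--             for j in range(26):
--                 if char[j]:          # Found the smallest no. before *
--                     arr[char[j].pop()] = '*' # Replace the last index of smallest char with *
--                     break
--
--     return ''.join(c for c in arr if c != '*')
-- ===== SOURCE B (Python) =====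
-- def clearStars(s: str) -> str:
--     # One sorted priority queue of (char, -index) instead of 26 per-letter stacks:
--     # the head is always the smallest char with the largest index.
--     pq = []            # kept sorted ascending by (char, -index)
--     removed = set()    # indices dropped from the answer
--     for i, c in enumerate(s):
--         if c == '*':
--             removed.add(i)
--             if pq:
--                 _, ni = pq.pop(0)   # smallest char, latest occurrence
--                 removed.add(-ni)
--         else:
--             key = (c, -i)
--             lo, hi = 0, len(pq)     # binary search for the insertion point
--             while lo < hi:
--                 mid = (lo + hi) // 2
--                 if pq[mid] < key:
--                     lo = mid + 1
--                 else:
--                     hi = mid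
--             pq.insert(lo, key)
--     return ''.join(c for i, c in enumerate(s) if i not in removed)
-- ===== Notes on version B (the rewrite author's own statement) =====
-- stated objective: alternative
-- what changed: A's 26 per-letter index stacks with a smallest-letter-first bucket scan at every '*' are replaced by a single sorted priority queue of (char, -index) tuples maintained by binary-search insertion, plus a removed-index set; the result is rebuilt by index instead of by in-place '*' overwriting.
-- outside the precondition, e.g. on clearStars('Ga*'): A returns 'G', B returns 'a'; on clearStars('A'): A raises IndexError, B returns 'A'
import Mathlib
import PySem

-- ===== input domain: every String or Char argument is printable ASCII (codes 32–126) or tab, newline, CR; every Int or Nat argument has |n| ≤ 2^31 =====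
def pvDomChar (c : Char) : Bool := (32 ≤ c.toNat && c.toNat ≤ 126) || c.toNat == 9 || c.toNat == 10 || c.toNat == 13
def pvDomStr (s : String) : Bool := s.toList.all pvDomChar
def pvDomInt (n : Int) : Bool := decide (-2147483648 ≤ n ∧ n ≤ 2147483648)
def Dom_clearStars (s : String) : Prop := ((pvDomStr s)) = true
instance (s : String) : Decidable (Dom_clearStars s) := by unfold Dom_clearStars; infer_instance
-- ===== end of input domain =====

-- B replaces A's 26 per-letter index stacks (scanned smallest-letter-first at every '*')
-- by ONE sorted priority queue of (char, -index) plus a removed-index set (objective: alternative).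

-- ===== PORT A =====
-- Python mutates arr while enumerating it; every mutation is at an index strictly below the
-- current position, so folding over the initial enumeration while threading arr is exact.
-- char[k].append(i); an out-of-range k (IndexError in Python) leaves buckets unchanged — excluded by Pre_.
def pvA_push (buckets : List (List Int)) (k : Int) (i : Int) : List (List Int) :=
  match PySem.List.pyGet? buckets k with
  | some b => PySem.List.pySetD buckets k (b ++ [i])
  | none => buckets

-- the inner 'for j in range(26): if char[j]: … char[j].pop() … break' loop
def pvA_pop : List (List Int) → Option (Int × List (List Int))
  | [] => none
  | [] :: bs => (pvA_pop bs).map (fun p => (p.1, ([] : List Int) :: p.2))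
  | (x :: xs) :: bs => some ((x :: xs).getLast (by simp), (x :: xs).dropLast :: bs)

def pvA_step (st : List (List Int) × List Char) (p : Int × Char) : List (List Int) × List Char :=
  if p.2 ≠ '*' then (pvA_push st.1 ((p.2.toNat : Int) - 97) p.1, st.2)
  else
    match pvA_pop st.1 with
    | some (j, b') => (b', PySem.List.pySetD st.2 j '*')
    | none => (st.1, st.2)

def clearStars (s : String) : String :=
  let arr := s.toList
  let st := (PySem.List.enumerate arr 0).foldl pvA_step (List.replicate 26 [], arr)
  String.ofList (st.2.filter (fun c => c ≠ '*'))

-- ===== PORT B =====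
-- tuple comparison (c1, n1) < (c2, n2)
def pvB_lt (a b : Char × Int) : Bool := a.1 < b.1 || (a.1 == b.1 && a.2 < b.2)

-- the 'lo, hi = 0, len(pq); while lo < hi: …' binary search for the insertion point;
-- (lo+hi)//2 on nonnegative ints is Nat division; pq[mid] is in range whenever lo < hi ≤ len pq,
-- so the getD default is never read
def pvB_search (pq : List (Char × Int)) (key : Char × Int) (lo hi : Nat) : Nat :=
  if lo < hi then
    if pvB_lt (pq.getD ((lo + hi) / 2) ('a', 0)) key then pvB_search pq key ((lo + hi) / 2 + 1) hi
    else pvB_search pq key lo ((lo + hi) / 2)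
  else lo
termination_by hi - lo
decreasing_by all_goals omega

def pvB_step (st : List (Char × Int) × PySem.Set Int) (p : Int × Char) :
    List (Char × Int) × PySem.Set Int :=
  if p.2 = '*' then
    match st.1 with
    | [] => (st.1, PySem.Set.add st.2 p.1)
    | e :: rest => (rest, PySem.Set.add (PySem.Set.add st.2 p.1) (-e.2))
  else (PySem.List.insert st.1 ((pvB_search st.1 (p.2, -p.1) 0 st.1.length : Nat) : Int) (p.2, -p.1), st.2)

def clearStars_alt (s : String) : String :=
  let st := (PySem.List.enumerate s.toList 0).foldl pvB_step ([], PySem.Set.empty)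
  String.ofList (((PySem.List.enumerate s.toList 0).filter
      (fun p => !(PySem.Set.contains st.2 p.1))).map (·.2))

-- ===== PRECONDITION & SPEC =====
-- Pre_ admits the problem's natural alphabet (lowercase letters and '*'), plus any star-free string
-- over 'G'..'z' (no deletion ever happens there): it excludes strings where A raises IndexError
-- (a char below 'G' or above 'z') and strings mixing '*' with chars 'G'..'`', where A's pops go
-- through accidental negative-index wraparound into the wrong letter bucket.
def Pre_clearStars (s : String) : Prop :=
  s.toList.all (fun c => c == '*' || ('a' ≤ c && c ≤ 'z')) = true
  ∨ s.toList.all (fun c => 'G' ≤ c && c ≤ 'z') = true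
instance (s : String) : Decidable (Pre_clearStars s) := by unfold Pre_clearStars; infer_instance

def pvWitness_clearStars : String := "aab*c*"

def Spec_clearStars (s : String) (out : String) : Prop := out = clearStars_alt s
instance (s : String) (out : String) : Decidable (Spec_clearStars s out) := by unfold Spec_clearStars; infer_instance

-- ===== CLAIM (what is proved, stated in full; the proofs are below) =====
def Claim_equal_clearStars : Prop := ∀ (s : String), Dom_clearStars s → Pre_clearStars s → Spec_clearStars s (clearStars s)

-- ===== LEMMAS AND PROOFS =====

-- the priority queue as the concatenation of the (reversed) buckets, bucket j labelled Char.ofNat (base+j)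
def pvFlat : Nat → List (List Int) → List (Char × Int)
  | _, [] => []
  | base, b :: bs => b.reverse.map (fun i => (Char.ofNat base, -i)) ++ pvFlat (base+1) bs

-- A's live arr, as the original masked by the removed set
def pvMask (orig : List Char) (rem : PySem.Set Int) : List Char :=
  (PySem.List.enumerate orig 0).map (fun p => if PySem.Set.contains rem p.1 then '*' else p.2)

-- proof-side: the linear-scan insertion the binary search is proved equal to
def pvB_insert (key : Char × Int) : List (Char × Int) → List (Char × Int)
  | [] => [key]
  | e :: es => if pvB_lt e key then e :: pvB_insert key es else key :: e :: es

lemma pvOfNat_lt {a b : Nat} (ha : a < 55296) (hb : b < 55296) :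
    (Char.ofNat a < Char.ofNat b) ↔ a < b := by
  rw [Char.lt_def, UInt32.lt_iff_toNat_lt]
  show (Char.ofNat a).toNat < (Char.ofNat b).toNat ↔ _
  simp [Char.toNat_ofNat, Nat.isValidChar, ha, hb]

lemma pvOfNat_eq {a b : Nat} (ha : a < 55296) (hb : b < 55296) :
    (Char.ofNat a = Char.ofNat b) ↔ a = b := by
  constructor
  · intro h
    have := congrArg Char.toNat h
    simpa [Char.toNat_ofNat, Nat.isValidChar, ha, hb] using this
  · rintro rfl; rfl

lemma pvFlat_mem {base : Nat} {bs : List (List Int)} {e : Char × Int} (he : e ∈ pvFlat base bs) :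
    ∃ j x, ∃ h : j < bs.length, e = (Char.ofNat (base + j), -x) ∧ x ∈ bs[j] := by
  induction bs generalizing base with
  | nil => simp [pvFlat] at he
  | cons b bs ih =>
    simp only [pvFlat, List.mem_append, List.mem_map] at he
    rcases he with ⟨x, hx, rfl⟩ | he
    · exact ⟨0, x, by simp, by simp, by simpa using hx⟩
    · obtain ⟨j, x, hj, rfl, hx⟩ := ih he
      exact ⟨j + 1, x, by simpa using hj, by rw [show base + (j+1) = base + 1 + j by omega], by simpa using hx⟩

lemma pvInsert_append {key : Char × Int} {l₁ l₂ : List (Char × Int)}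
    (h : ∀ e ∈ l₁, pvB_lt e key = true) :
    pvB_insert key (l₁ ++ l₂) = l₁ ++ pvB_insert key l₂ := by
  induction l₁ with
  | nil => simp
  | cons e es ih =>
    simp only [List.cons_append, pvB_insert, h e (by simp)]
    simp only [if_true]
    rw [ih (fun e' he' => h e' (by simp [he']))]

lemma pvInsert_front {key : Char × Int} {l : List (Char × Int)}
    (h : ∀ e ∈ l, pvB_lt e key = false) :
    pvB_insert key l = key :: l := by
  cases l with
  | nil => rfl
  | cons e es => simp [pvB_insert, h e (by simp)]

lemma pvInsert_flat (base : Nat) (bs : List (List Int)) (k : Nat) (i : Int)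
    (hk : k < bs.length) (hv : base + bs.length ≤ 55296)
    (hidx : ∀ b ∈ bs, ∀ x ∈ b, x < i) :
    pvB_insert (Char.ofNat (base + k), -i) (pvFlat base bs)
      = pvFlat base (bs.set k (bs[k] ++ [i])) := by
  induction bs generalizing base k with
  | nil => simp at hk
  | cons b bs ih =>
    cases k with
    | zero =>
      -- key goes at the very front: every element of pvFlat base (b :: bs) is not < key
      have hfront : ∀ e ∈ pvFlat base (b :: bs), pvB_lt e (Char.ofNat (base + 0), -i) = false := by
        intro e he
        obtain ⟨j, x, hj, rfl, hx⟩ := pvFlat_mem he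
        simp only [pvB_lt, Bool.or_eq_false_iff, Bool.and_eq_false_iff]
        constructor
        · simp only [decide_eq_false_iff_not, not_lt]
          rw [show base + 0 = base by omega]
          by_cases hj0 : j = 0
          · subst hj0; simp
          · exact le_of_lt ((pvOfNat_lt (by omega) (by simp at hj; omega)).2 (by omega))
        · by_cases hj0 : j = 0
          · subst hj0
            right
            simp only [decide_eq_false_iff_not, not_lt]
            have : x < i := hidx b (by simp) x (by simpa using hx)
            omega
          · left
            simp only [beq_eq_false_iff_ne, ne_eq]
            rw [pvOfNat_eq (by simp at hj; omega) (by omega)]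
            omega
      rw [pvInsert_front hfront]
      simp only [List.set]
      simp [pvFlat, List.reverse_append]
    | succ k' =>
      have hlt : ∀ e ∈ b.reverse.map (fun i => (Char.ofNat base, -i)), pvB_lt e (Char.ofNat (base + (k'+1)), -i) = true := by
        intro e he
        simp only [List.mem_map] at he
        obtain ⟨x, _, rfl⟩ := he
        simp only [pvB_lt, Bool.or_eq_true_iff]
        left
        simp only [decide_eq_true_eq]
        have hk' : k' + 1 < bs.length + 1 := by simpa using hk
        have hv' : base + (bs.length + 1) ≤ 55296 := by simpa using hv
        exact (pvOfNat_lt (by omega) (by omega)).2 (by omega)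
      simp only [pvFlat]
      rw [pvInsert_append hlt]
      have : base + (k' + 1) = (base + 1) + k' := by omega
      rw [this]
      have hk' : k' + 1 < bs.length + 1 := by simpa using hk
      have hv' : base + (bs.length + 1) ≤ 55296 := by simpa using hv
      rw [ih (base+1) k' (by omega) (by omega)
          (fun b' hb' x hx => hidx b' (by simp [hb']) x hx)]
      simp [pvFlat, List.set]

lemma pvPop_some {bs : List (List Int)} {j : Int} {bs' : List (List Int)} (base : Nat)
    (h : pvA_pop bs = some (j, bs')) :
    ∃ ch, pvFlat base bs = (ch, -j) :: pvFlat base bs' := by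
  induction bs generalizing base bs' with
  | nil => simp [pvA_pop] at h
  | cons b bs ih =>
    cases b with
    | nil =>
      simp only [pvA_pop, Option.map_eq_some_iff] at h
      obtain ⟨⟨j0, bs0⟩, hpop, heq⟩ := h
      rw [Prod.mk.injEq] at heq
      obtain ⟨h1, h2⟩ := heq
      subst h1; subst h2
      obtain ⟨ch, hch⟩ := ih (base + 1) hpop
      exact ⟨ch, by simp [pvFlat, hch]⟩
    | cons x xs =>
      simp only [pvA_pop, Option.some_inj] at h
      obtain ⟨h1, h2⟩ : (x :: xs).getLast (by simp) = j ∧ (x :: xs).dropLast :: bs = bs' := by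
        constructor <;> [exact congrArg Prod.fst h; exact congrArg Prod.snd h]
      subst h2
      refine ⟨Char.ofNat base, ?_⟩
      have hsplit : (x :: xs) = (x :: xs).dropLast ++ [(x :: xs).getLast (by simp)] :=
        (List.dropLast_append_getLast (by simp)).symm
      conv_lhs => rw [pvFlat, hsplit]
      simp [pvFlat, List.reverse_append, h1]

lemma pvPop_none {bs : List (List Int)} (base : Nat) (h : pvA_pop bs = none) :
    pvFlat base bs = [] := by
  induction bs generalizing base with
  | nil => rfl
  | cons b bs ih =>
    cases b with
    | nil =>
      simp only [pvA_pop, Option.map_eq_none_iff] at h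
      simp [pvFlat, ih _ h]
    | cons x xs => simp [pvA_pop] at h

lemma pvPop_len {bs : List (List Int)} {j : Int} {bs' : List (List Int)}
    (h : pvA_pop bs = some (j, bs')) : bs'.length = bs.length := by
  induction bs generalizing bs' with
  | nil => simp [pvA_pop] at h
  | cons b bs ih =>
    cases b with
    | nil =>
      simp only [pvA_pop, Option.map_eq_some_iff] at h
      obtain ⟨⟨j0, bs0⟩, hpop, heq⟩ := h
      rw [Prod.mk.injEq] at heq
      obtain ⟨h1, h2⟩ := heq
      subst h1; subst h2
      simp [ih hpop]
    | cons x xs =>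
      have h2 : (x :: xs).dropLast :: bs = bs' := congrArg Prod.snd (Option.some_inj.mp h)
      subst h2; simp

lemma pvPop_sub {bs : List (List Int)} {j : Int} {bs' : List (List Int)}
    (h : pvA_pop bs = some (j, bs')) :
    (∃ b ∈ bs, j ∈ b) ∧ ∀ b ∈ bs', ∀ x ∈ b, ∃ b0 ∈ bs, x ∈ b0 := by
  induction bs generalizing bs' with
  | nil => simp [pvA_pop] at h
  | cons b bs ih =>
    cases b with
    | nil =>
      simp only [pvA_pop, Option.map_eq_some_iff] at h
      obtain ⟨⟨j0, bs0⟩, hpop, heq⟩ := h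
      rw [Prod.mk.injEq] at heq
      obtain ⟨h1, h2⟩ := heq
      subst h1; subst h2
      obtain ⟨⟨b0, hb0, hj⟩, hsub⟩ := ih hpop
      refine ⟨⟨b0, by simp [hb0], hj⟩, ?_⟩
      intro b hb x hx
      rcases List.mem_cons.mp hb with rfl | hb
      · simp at hx
      · obtain ⟨b1, hb1, hx1⟩ := hsub b hb x hx
        exact ⟨b1, by simp [hb1], hx1⟩
    | cons x xs =>
      obtain ⟨h1, h2⟩ : (x :: xs).getLast (by simp) = j ∧ (x :: xs).dropLast :: bs = bs' := by
        constructor <;> [exact congrArg Prod.fst (Option.some_inj.mp h); exact congrArg Prod.snd (Option.some_inj.mp h)]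
      subst h2
      refine ⟨⟨x :: xs, by simp, h1 ▸ List.getLast_mem _⟩, ?_⟩
      intro b hb y hy
      rcases List.mem_cons.mp hb with rfl | hb
      · exact ⟨x :: xs, by simp, (List.dropLast_sublist _).subset hy⟩
      · exact ⟨b, by simp [hb], hy⟩

lemma pvMask_length (orig : List Char) (rem : PySem.Set Int) :
    (pvMask orig rem).length = orig.length := by
  simp [pvMask, PySem.List.length_enumerate]

-- generalized-start mask for induction

lemma pvMaskAux_getElem (l : List Char) (s : Int) (rem : PySem.Set Int) (k : Nat) (hk : k < l.length) :
    ((PySem.List.enumerate l s).map (fun p => if PySem.Set.contains rem p.1 then '*' else p.2))[k]'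
      (by simp [PySem.List.length_enumerate, hk])
      = if PySem.Set.contains rem (s + k) then '*' else l[k] := by
  induction l generalizing s k with
  | nil => simp at hk
  | cons c l ih =>
    simp only [PySem.List.enumerate_cons]
    cases k with
    | zero => simp
    | succ k' =>
      simp only [List.map_cons, List.getElem_cons_succ]
      rw [ih (s+1) k' (by simpa using hk)]
      have : s + 1 + (k' : Int) = s + ((k' : Nat) + 1 : Nat) := by push_cast; ring
      rw [this]

lemma pvMask_getElem (orig : List Char) (rem : PySem.Set Int) (k : Nat) (hk : k < orig.length) :
    (pvMask orig rem)[k]'(by rw [pvMask_length]; exact hk)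
      = if PySem.Set.contains rem (k : Int) then '*' else orig[k] := by
  have := pvMaskAux_getElem orig 0 rem k hk
  simpa [pvMask] using this

lemma pvContains_add (s : PySem.Set Int) (x y : Int) :
    PySem.Set.contains (PySem.Set.add s x) y = (y == x || PySem.Set.contains s y) := by
  simp only [PySem.Set.add, PySem.Set.contains]
  split
  · rename_i h
    by_cases hxy : y = x
    · subst hxy
      simp_all [List.contains_eq_mem]
    · simp [hxy]
  · simp [List.contains_eq_mem]
    by_cases hxy : y = x <;> simp [hxy]

lemma pvFinalAux (l : List Char) (s : Int) (rem : PySem.Set Int)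
    (hst : ∀ p ∈ PySem.List.enumerate l s, p.2 = '*' → PySem.Set.contains rem p.1 = true) :
    ((PySem.List.enumerate l s).map (fun p => if PySem.Set.contains rem p.1 then '*' else p.2)).filter (fun c => c ≠ '*')
      = ((PySem.List.enumerate l s).filter (fun p => !(PySem.Set.contains rem p.1))).map (·.2) := by
  induction l generalizing s with
  | nil => simp
  | cons c l ih =>
    have ih' := ih (s+1) (fun p hp h => hst p (by rw [PySem.List.enumerate_cons]; simp [hp]) h)
    rw [PySem.List.enumerate_cons]
    by_cases hc : PySem.Set.contains rem s = true
    · have hm : s ∈ rem := by simpa [PySem.Set.contains, List.contains_eq_mem] using hc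
      simp [hm]
      simpa using ih'
    · have hcstar : c ≠ '*' := by
        intro hcc
        exact hc (hst (s, c) (by rw [PySem.List.enumerate_cons]; simp) hcc)
      have hm : s ∉ rem := by simpa [PySem.Set.contains, List.contains_eq_mem] using hc
      simp [hm, hcstar]
      simpa using ih'

lemma pvB_lt_trans {a b c : Char × Int} (h1 : pvB_lt a b = true) (h2 : pvB_lt b c = true) :
    pvB_lt a c = true := by
  simp only [pvB_lt, Bool.or_eq_true_iff, Bool.and_eq_true_iff, decide_eq_true_eq, beq_iff_eq] at *
  rcases h1 with h1 | ⟨h1e, h1i⟩ <;> rcases h2 with h2 | ⟨h2e, h2i⟩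
  · exact Or.inl (lt_trans h1 h2)
  · exact Or.inl (h2e ▸ h1)
  · exact Or.inl (h1e ▸ h2)
  · exact Or.inr ⟨h1e.trans h2e, lt_trans h1i h2i⟩

lemma pvFlat_pairwise (base : Nat) (bs : List (List Int)) (hv : base + bs.length ≤ 55296)
    (hs : ∀ b ∈ bs, b.Pairwise (· < ·)) :
    (pvFlat base bs).Pairwise (fun a b => pvB_lt a b = true) := by
  induction bs generalizing base with
  | nil => simp [pvFlat]
  | cons b bs ih =>
    rw [pvFlat, List.pairwise_append]
    refine ⟨?_, ih (base+1) (by simp at hv ⊢; omega) (fun b' hb' => hs b' (by simp [hb'])), ?_⟩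
    · rw [List.pairwise_map, List.pairwise_reverse]
      have hb := hs b (by simp)
      refine hb.imp ?_
      intro x y hxy
      simp [pvB_lt, hxy]
    · intro x hx y hy
      obtain ⟨xi, _, rfl⟩ := List.mem_map.mp hx
      obtain ⟨j, yx, hj, rfl, _⟩ := pvFlat_mem hy
      simp only [pvB_lt, Bool.or_eq_true_iff, decide_eq_true_eq]
      left
      exact (pvOfNat_lt (by simp at hv; omega) (by simp at hv; omega)).2 (by omega)

lemma pvSearch_char (pq : List (Char × Int)) (key : Char × Int)
    (hmono : ∀ m1 m2 : Nat, ∀ h12 : m1 ≤ m2, ∀ hm : m2 < pq.length,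
      pvB_lt (pq[m2]) key = true → pvB_lt (pq[m1]'(by omega)) key = true) :
    ∀ (k lo hi : Nat), hi - lo ≤ k → lo ≤ hi → hi ≤ pq.length →
    (∀ m : Nat, m < lo → ∀ hm : m < pq.length, pvB_lt pq[m] key = true) →
    (∀ m : Nat, hi ≤ m → ∀ hm : m < pq.length, pvB_lt pq[m] key = false) →
    pvB_search pq key lo hi ≤ pq.length ∧
    (∀ m : Nat, m < pvB_search pq key lo hi → ∀ hm : m < pq.length, pvB_lt pq[m] key = true) ∧
    (∀ m : Nat, pvB_search pq key lo hi ≤ m → ∀ hm : m < pq.length, pvB_lt pq[m] key = false) := by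
  intro k
  induction k with
  | zero =>
    intro lo hi hk hlh hhl hlo hhi
    have : ¬ lo < hi := by omega
    rw [pvB_search, if_neg this]
    exact ⟨by omega, hlo, fun m hm hml => hhi m (by omega) hml⟩
  | succ k ih =>
    intro lo hi hk hlh hhl hlo hhi
    by_cases h : lo < hi
    · rw [pvB_search, if_pos h]
      have hmid : (lo + hi) / 2 < pq.length := by omega
      rw [List.getD_eq_getElem pq _ hmid]
      by_cases hp : pvB_lt pq[(lo + hi) / 2] key = true
      · rw [if_pos hp]
        exact ih ((lo + hi) / 2 + 1) hi (by omega) (by omega) hhl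
          (fun m hm hml => hmono m ((lo + hi) / 2) (by omega) hmid hp) hhi
      · rw [if_neg hp]
        refine ih lo ((lo + hi) / 2) (by omega) (by omega) (by omega) hlo ?_
        intro m hm hml
        by_contra hcon
        exact hp (hmono ((lo + hi) / 2) m hm hml (by simpa using hcon))
    · rw [pvB_search, if_neg h]
      exact ⟨by omega, hlo, fun m hm hml => hhi m (by omega) hml⟩

lemma pvInsert_pos (key : Char × Int) : ∀ (pq : List (Char × Int)) (r : Nat), r ≤ pq.length →
    (∀ m : Nat, m < r → ∀ hm : m < pq.length, pvB_lt pq[m] key = true) →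
    (∀ m : Nat, r ≤ m → ∀ hm : m < pq.length, pvB_lt pq[m] key = false) →
    pvB_insert key pq = pq.take r ++ key :: pq.drop r := by
  intro pq
  induction pq with
  | nil =>
    intro r hr _ _
    have : r = 0 := by simpa using hr
    subst this; rfl
  | cons e es ih =>
    intro r hr hlo hhi
    cases r with
    | zero =>
      have he : pvB_lt e key = false := hhi 0 (by omega) (by simp)
      simp [pvB_insert, he]
    | succ r' =>
      have he : pvB_lt e key = true := hlo 0 (by omega) (by simp)
      simp only [pvB_insert, he, if_true, List.take_succ_cons, List.drop_succ_cons, List.cons_append]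
      congr 1
      exact ih r' (by simpa using hr)
        (fun m hm hml => hlo (m+1) (by omega) (by simpa using hml))
        (fun m hm hml => hhi (m+1) (by omega) (by simpa using hml))

lemma pvSearch_eq (pq : List (Char × Int)) (key : Char × Int)
    (hp : pq.Pairwise (fun a b => pvB_lt a b = true)) :
    PySem.List.insert pq ((pvB_search pq key 0 pq.length : Nat) : Int) key = pvB_insert key pq := by
  have hmono : ∀ m1 m2 : Nat, ∀ h12 : m1 ≤ m2, ∀ hm : m2 < pq.length,
      pvB_lt (pq[m2]) key = true → pvB_lt (pq[m1]'(by omega)) key = true := by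
    intro m1 m2 h12 hm h2
    rcases Nat.lt_or_ge m1 m2 with hlt | hge
    · exact pvB_lt_trans (List.pairwise_iff_getElem.mp hp m1 m2 (by omega) hm hlt) h2
    · have : m1 = m2 := by omega
      subst this; exact h2
  obtain ⟨hle, hlo, hhi⟩ := pvSearch_char pq key hmono pq.length 0 pq.length
    (by omega) (by omega) (le_refl _) (by omega) (fun m hm hml => by omega)
  rw [PySem.List.insert_natCast pq _ key hle]
  exact (pvInsert_pos key pq _ hle hlo hhi).symm

lemma pvPop_sorted {bs : List (List Int)} {j : Int} {bs' : List (List Int)}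
    (h : pvA_pop bs = some (j, bs')) (hs : ∀ b ∈ bs, b.Pairwise (· < ·)) :
    ∀ b ∈ bs', b.Pairwise (· < ·) := by
  induction bs generalizing bs' with
  | nil => simp [pvA_pop] at h
  | cons b bs ih =>
    cases b with
    | nil =>
      simp only [pvA_pop, Option.map_eq_some_iff] at h
      obtain ⟨⟨j0, bs0⟩, hpop, heq⟩ := h
      rw [Prod.mk.injEq] at heq
      obtain ⟨h1, h2⟩ := heq
      subst h1; subst h2
      intro b' hb'
      rcases List.mem_cons.mp hb' with rfl | hb'
      · simp
      · exact ih hpop (fun b0 hb0 => hs b0 (by simp [hb0])) b' hb'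
    | cons x xs =>
      have h2 : (x :: xs).dropLast :: bs = bs' := congrArg Prod.snd (Option.some_inj.mp h)
      subst h2
      intro b' hb'
      rcases List.mem_cons.mp hb' with rfl | hb'
      · exact (hs (x :: xs) (by simp)).sublist (List.dropLast_sublist _)
      · exact hs b' (by simp [hb'])

lemma pvMask_set_star (orig : List Char) (rem : PySem.Set Int) (j : Int)
    (hj0 : 0 ≤ j) (_hjl : j.toNat < orig.length) :
    (pvMask orig rem).set j.toNat '*' = pvMask orig (PySem.Set.add rem j) := by
  apply List.ext_getElem
  · simp [pvMask_length]
  · intro m hm1 hm2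
    rw [List.getElem_set]
    have hmo : m < orig.length := by simpa [pvMask_length] using hm2
    rw [pvMask_getElem orig (PySem.Set.add rem j) m hmo]
    rw [pvContains_add]
    by_cases hmj : m = j.toNat
    · subst hmj
      simp [Int.toNat_of_nonneg hj0]
    · have hbeq : ((m : Int) == j) = false := by simp; omega
      rw [if_neg (by omega : ¬ j.toNat = m)]
      simp only [hbeq, Bool.false_or]
      exact pvMask_getElem orig rem m hmo

lemma pvMask_add_star (orig : List Char) (rem : PySem.Set Int) (n : Nat)
    (hn : n < orig.length) (hstar : orig[n] = '*') :
    pvMask orig rem = pvMask orig (PySem.Set.add rem (n : Int)) := by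
  apply List.ext_getElem
  · simp [pvMask_length]
  · intro m hm1 hm2
    have hmo : m < orig.length := by simpa [pvMask_length] using hm1
    rw [pvMask_getElem orig rem m hmo, pvMask_getElem orig _ m hmo, pvContains_add]
    by_cases hmn : m = n
    · subst hmn
      simp [hstar]
    · have : ((m : Int) == (n : Int)) = false := by simp; omega
      simp [this]

lemma pvMain (orig : List Char)
    (hchars : ∀ c ∈ orig, c = '*' ∨ ('a' ≤ c ∧ c ≤ 'z')) :
    ∀ (rest : List Char) (n : Nat) (buckets : List (List Int)) (rem : PySem.Set Int),
    buckets.length = 26 →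
    orig.drop n = rest →
    n + rest.length = orig.length →
    (∀ b ∈ buckets, ∀ x ∈ b, 0 ≤ x ∧ x < (n : Int)) →
    (∀ b ∈ buckets, b.Pairwise (· < ·)) →
    (∀ k : Nat, k < n → orig[k]? = some '*' → PySem.Set.contains rem (k : Int) = true) →
    ((PySem.List.enumerate rest (n : Int)).foldl pvA_step (buckets, pvMask orig rem)).2.filter (fun c => c ≠ '*')
      = ((PySem.List.enumerate orig 0).filter
          (fun p => !(PySem.Set.contains
            ((PySem.List.enumerate rest (n : Int)).foldl pvB_step (pvFlat 97 buckets, rem)).2 p.1))).map (·.2) := by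
  intro rest
  induction rest with
  | nil =>
    intro n buckets rem hb hdrop hn hidx hsorted hstars
    simp only [PySem.List.enumerate_nil, List.foldl_nil]
    apply pvFinalAux orig 0 rem
    intro p hp hpstar
    obtain ⟨k, hk, rfl⟩ := (PySem.List.mem_enumerate_iff _ _ _).1 hp
    simp only [zero_add]
    apply hstars k (by simp at hn; omega) _
    · simp only at hpstar
      simp [List.getElem?_eq_getElem hk, hpstar]
  | cons c rest' ih =>
    intro n buckets rem hb hdrop hn hidx hsorted hstars
    have hnlen : n < orig.length := by simp at hn; omega
    have hcn : orig[n]'hnlen = c := by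
      have h0 : (orig.drop n)[0]? = some c := by rw [hdrop]; simp
      rw [List.getElem?_drop] at h0
      simp only [Nat.add_zero] at h0
      rw [List.getElem?_eq_getElem hnlen] at h0
      exact Option.some_inj.mp h0
    have hdrop' : orig.drop (n+1) = rest' := by
      have := congrArg List.tail hdrop
      simpa [List.tail_drop] using this
    rw [PySem.List.enumerate_cons]
    simp only [List.foldl_cons]
    by_cases hcstar : c = '*'
    · -- star step
      subst hcstar
      cases hpop : pvA_pop buckets with
      | none =>
        have hA : pvA_step (buckets, pvMask orig rem) ((n : Int), '*')
            = (buckets, pvMask orig rem) := by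
          simp [pvA_step, hpop]
        have hflat : pvFlat 97 buckets = [] := pvPop_none 97 hpop
        have hB : pvB_step (pvFlat 97 buckets, rem) ((n : Int), '*')
            = (pvFlat 97 buckets, PySem.Set.add rem (n : Int)) := by
          rw [hflat]; simp [pvB_step]
        rw [hA, hB]
        rw [pvMask_add_star orig rem n hnlen hcn]
        have := ih (n+1) buckets (PySem.Set.add rem (n:Int)) hb hdrop' (by simp at hn ⊢; omega)
          (fun b hb' x hx => ⟨(hidx b hb' x hx).1, by have := (hidx b hb' x hx).2; omega⟩)
          hsorted
          (fun k hk hks => by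
            rw [pvContains_add]
            by_cases hkn : k = n
            · subst hkn; simp
            · rw [hstars k (by omega) hks]; simp)
        have hcast : ((n : Int) + 1) = ((n + 1 : Nat) : Int) := by push_cast; ring
        rw [hcast]
        exact this
      | some p =>
        obtain ⟨j, b'⟩ := p
        have hA : pvA_step (buckets, pvMask orig rem) ((n : Int), '*')
            = (b', PySem.List.pySetD (pvMask orig rem) j '*') := by
          simp [pvA_step, hpop]
        obtain ⟨ch, hflat⟩ := pvPop_some 97 hpop
        have hB : pvB_step (pvFlat 97 buckets, rem) ((n : Int), '*')
            = (pvFlat 97 b', PySem.Set.add (PySem.Set.add rem (n : Int)) j) := by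
          rw [hflat]; simp [pvB_step]
        rw [hA, hB]
        obtain ⟨⟨b0, hb0, hjb0⟩, hsub⟩ := pvPop_sub hpop
        have hjb : 0 ≤ j ∧ j < (n : Int) := hidx b0 hb0 j hjb0
        have hjlen : j.toNat < orig.length := by omega
        have harr : PySem.List.pySetD (pvMask orig rem) j '*'
            = pvMask orig (PySem.Set.add (PySem.Set.add rem (n : Int)) j) := by
          rw [PySem.List.pySetD_of_nonneg _ _ hjb.1]
          rw [pvMask_add_star orig rem n hnlen hcn]
          exact pvMask_set_star orig _ j hjb.1 hjlen
        rw [harr]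
        have := ih (n+1) b' (PySem.Set.add (PySem.Set.add rem (n:Int)) j)
          (by rw [pvPop_len hpop]; exact hb) hdrop' (by simp at hn ⊢; omega)
          (fun b hb' x hx => by
            obtain ⟨b1, hb1, hx1⟩ := hsub b hb' x hx
            exact ⟨(hidx b1 hb1 x hx1).1, by have := (hidx b1 hb1 x hx1).2; omega⟩)
          (pvPop_sorted hpop hsorted)
          (fun k hk hks => by
            rw [pvContains_add, pvContains_add]
            by_cases hkn : k = n
            · subst hkn; simp
            · rw [hstars k (by omega) hks]; simp)
        have hcast : ((n : Int) + 1) = ((n + 1 : Nat) : Int) := by push_cast; ring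
        rw [hcast]
        exact this
    · -- letter step
      have hlow : 'a' ≤ c ∧ c ≤ 'z' := by
        rcases hchars c (by rw [← hcn]; exact List.getElem_mem hnlen) with h | h
        · exact absurd h hcstar
        · exact h
      have h97 : 97 ≤ c.toNat := by
        have := hlow.1; rw [Char.le_def, UInt32.le_iff_toNat_le] at this; exact this
      have h122 : c.toNat ≤ 122 := by
        have := hlow.2; rw [Char.le_def, UInt32.le_iff_toNat_le] at this; exact this
      set knat : Nat := c.toNat - 97 with hknat
      have hk26 : knat < 26 := by omega
      have hkcast : ((c.toNat : Int) - 97) = (knat : Int) := by omega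
      have hA : pvA_step (buckets, pvMask orig rem) ((n : Int), c)
          = (buckets.set knat ((buckets[knat]'(by omega)) ++ [(n : Int)]), pvMask orig rem) := by
        simp only [pvA_step, if_pos hcstar]
        unfold pvA_push
        rw [hkcast]
        rw [PySem.List.pyGet?_natCast, List.getElem?_eq_getElem (by omega)]
        simp only
        rw [PySem.List.pySetD_natCast]
      have hB : pvB_step (pvFlat 97 buckets, rem) ((n : Int), c)
          = (pvFlat 97 (buckets.set knat ((buckets[knat]'(by omega)) ++ [(n : Int)])), rem) := by
        simp only [pvB_step, if_neg hcstar]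
        have hcof : c = Char.ofNat (97 + knat) := by
          rw [show 97 + knat = c.toNat by omega, Char.ofNat_toNat]
        congr 1
        rw [pvSearch_eq _ _ (pvFlat_pairwise 97 buckets (by omega) hsorted)]
        conv_lhs => rw [hcof]
        exact pvInsert_flat 97 buckets knat (n : Int) (by omega) (by omega)
          (fun b hb' x hx => (hidx b hb' x hx).2)
      rw [hA, hB]
      have := ih (n+1) (buckets.set knat ((buckets[knat]'(by omega)) ++ [(n : Int)])) rem
        (by simp [hb]) hdrop' (by simp at hn ⊢; omega)
        (fun b hb' x hx => by
          rcases List.mem_or_eq_of_mem_set hb' with h | rfl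
          · exact ⟨(hidx b h x hx).1, by have := (hidx b h x hx).2; omega⟩
          · rcases List.mem_append.mp hx with h | h
            · exact ⟨(hidx _ (List.getElem_mem _) x h).1, by have := (hidx _ (List.getElem_mem _) x h).2; omega⟩
            · simp at h; subst h; constructor <;> omega)
        (fun b hb' => by
          rcases List.mem_or_eq_of_mem_set hb' with h | rfl
          · exact hsorted b h
          · rw [List.pairwise_append]
            exact ⟨hsorted _ (List.getElem_mem _), by simp,
              fun x hx y hy => by simp at hy; subst hy; exact (hidx _ (List.getElem_mem _) x hx).2⟩)
        (fun k hk hks => by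
          by_cases hkn : k = n
          · subst hkn
            rw [List.getElem?_eq_getElem hnlen, hcn] at hks
            exact absurd (Option.some_inj.mp hks) hcstar
          · exact hstars k (by omega) hks)
      have hcast : ((n : Int) + 1) = ((n + 1 : Nat) : Int) := by push_cast; ring
      rw [hcast]
      exact this

lemma pvA_nostar (l : List (Int × Char)) (h : ∀ p ∈ l, p.2 ≠ '*') :
    ∀ st : List (List Int) × List Char, (l.foldl pvA_step st).2 = st.2 := by
  induction l with
  | nil => intro st; rfl
  | cons p l ih =>
    intro st
    rw [List.foldl_cons, ih (fun q hq => h q (by simp [hq]))]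
    simp [pvA_step, h p (by simp)]

lemma pvB_nostar (l : List (Int × Char)) (h : ∀ p ∈ l, p.2 ≠ '*') :
    ∀ st : List (Char × Int) × PySem.Set Int, (l.foldl pvB_step st).2 = st.2 := by
  induction l with
  | nil => intro st; rfl
  | cons p l ih =>
    intro st
    rw [List.foldl_cons, ih (fun q hq => h q (by simp [hq]))]
    simp [pvB_step, h p (by simp)]

lemma pvMapSnd_enumerate (l : List Char) : ∀ s : Int, (PySem.List.enumerate l s).map (·.2) = l := by
  induction l with
  | nil => intro s; rfl
  | cons c l ih => intro s; rw [PySem.List.enumerate_cons]; simp [ih (s+1)]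

lemma pvFlat_replicate (base m : Nat) : pvFlat base (List.replicate m []) = [] := by
  induction m generalizing base with
  | zero => rfl
  | succ m ih => simp [List.replicate_succ, pvFlat, ih]

lemma pvMask_empty (orig : List Char) : pvMask orig PySem.Set.empty = orig := by
  apply List.ext_getElem
  · simp [pvMask_length]
  · intro m hm1 hm2
    rw [pvMask_getElem orig _ m (by simpa [pvMask_length] using hm1)]
    simp [PySem.Set.empty, PySem.Set.contains]

-- ===== VERDICT (by name: the statement is the Claim_ definition above) =====
theorem clearStars_spec : Claim_equal_clearStars := by
  intro s _ hpre
  rcases hpre with hpre | hpre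
  case inr =>
    -- star-free string: neither side ever deletes anything
    have hnostar : ∀ p ∈ PySem.List.enumerate s.toList 0, p.2 ≠ '*' := by
      intro p hp hcon
      obtain ⟨k, hk, rfl⟩ := (PySem.List.mem_enumerate_iff _ _ _).1 hp
      have := List.all_eq_true.1 hpre (s.toList[k]) (List.getElem_mem hk)
      simp only at hcon
      rw [hcon] at this
      simp [Char.le_def] at this
    unfold Spec_clearStars clearStars clearStars_alt
    simp only []
    congr 1
    rw [pvA_nostar _ hnostar, pvB_nostar _ hnostar]
    have hB : (PySem.List.enumerate s.toList 0).filter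
        (fun p => !(PySem.Set.contains PySem.Set.empty p.1)) = PySem.List.enumerate s.toList 0 :=
      List.filter_eq_self.mpr (fun p _ => by simp [PySem.Set.empty, PySem.Set.contains])
    rw [hB, pvMapSnd_enumerate]
    refine List.filter_eq_self.mpr (fun c hc => ?_)
    have h2 := List.all_eq_true.1 hpre c hc
    simp only [Bool.and_eq_true, decide_eq_true_eq] at h2
    simp only [ne_eq, decide_eq_true_eq]
    intro hcon
    subst hcon
    exact absurd h2.1 (by decide)
  have hpre' : ∀ c ∈ s.toList, c = '*' ∨ ('a' ≤ c ∧ c ≤ 'z') := by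
    intro c hc
    have := List.all_eq_true.1 hpre c hc
    simpa using this
  unfold Spec_clearStars clearStars clearStars_alt
  simp only []
  congr 1
  have h := pvMain s.toList hpre' s.toList 0 (List.replicate 26 []) PySem.Set.empty
    (by simp) (by simp) (by simp) (by simp) (by intro b hb; rw [List.eq_of_mem_replicate hb]; simp) (by omega)
  rw [pvMask_empty, pvFlat_replicate] at h
  simpa using h
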